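-- pv_equiv track=rewrite | github.com/SamKouteili/spec-mining-tsl | SygusFunctionSolver/IOSeperation.py | generate_mapping_classes
-- ===== SOURCE A (Python) =====
-- import itertools
--
-- def generate_mapping_classes(vars_list):
--     """
--     Generate mapping classes without duplicates.
--     Uses combinations (unordered) instead of permutations (ordered).
--     Ensures XY1 is only XY1, never YX1.
--     """
--
--     classes = {}
--
--     # All possible input subsets (size >= 1)
--     for r in range(1, len(vars_list) + 1):
--         for combo in itertools.combinations(vars_list, r):
--             # Sort for determinism (avoid XY vs YX)
--             inp_sorted = sorted(combo)
--             inp_prefix = "".join(inp_sorted) + "1"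
--
--             # Map to each possible output var
--             for out in vars_list:
--                 cls_name = f"{inp_prefix}_to_{out}2"
--                 classes[cls_name] = []
--
--     return classes
-- ===== SOURCE B (Python) =====
-- def _combos(vs, r):
--     """All r-element combinations of vs, in the order of their positions in vs."""
--     if r == 0:
--         return [[]]
--     if not vs:
--         return []
--     rest = vs[1:]
--     return [[vs[0]] + c for c in _combos(rest, r - 1)] + _combos(rest, r)
--
--
-- def generate_mapping_classes(vars_list):
--     """Two phases: first build the list of sorted-subset prefixes, then one dict
--     comprehension over the prefix x output-variable product (every value is [])."""
--     prefixes = ["".join(sorted(c)) + "1"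
--                 for r in range(1, len(vars_list) + 1)
--                 for c in _combos(vars_list, r)]
--     return {f"{p}_to_{out}2": [] for p in prefixes for out in vars_list}
-- ===== Notes on version B (the rewrite author's own statement) =====
-- stated objective: alternative
-- what changed: Replaces the single triple-nested loop calling itertools.combinations with a two-phase decomposition: a hand-written recursive combination generator builds the flat list of sorted-subset prefixes first, then one dict comprehension over the prefix x output-variable product fills the dict.
import Mathlib
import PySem

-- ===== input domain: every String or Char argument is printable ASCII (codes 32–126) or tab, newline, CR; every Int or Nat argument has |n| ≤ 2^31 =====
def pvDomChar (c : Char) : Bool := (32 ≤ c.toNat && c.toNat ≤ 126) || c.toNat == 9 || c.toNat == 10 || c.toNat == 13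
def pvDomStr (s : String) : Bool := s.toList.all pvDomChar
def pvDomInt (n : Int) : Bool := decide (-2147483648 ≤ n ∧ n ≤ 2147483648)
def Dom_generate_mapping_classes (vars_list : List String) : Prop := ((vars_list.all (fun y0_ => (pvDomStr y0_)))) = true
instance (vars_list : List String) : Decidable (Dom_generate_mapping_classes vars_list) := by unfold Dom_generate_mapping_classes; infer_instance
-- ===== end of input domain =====

-- B splits A's triple-nested loop into two phases: a recursive combination generator
-- producing the flat prefix list, then one dict comprehension over prefixes x outputs.

-- ===== PORT A =====
-- literal port of A: r-loop over range(1, len+1), itertools.combinations, sorted+join prefix, out-loop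
def generate_mapping_classes (vars_list : List String) : List (String × List String) :=
  let classes : PySem.Dict String (List String) := PySem.Dict.empty
  ((PySem.List.pyRange 1 (PySem.List.len vars_list + 1) 1).foldl (fun classes r =>
    (PySem.List.combinations vars_list r.toNat).foldl (fun classes combo =>
      let inp_sorted := PySem.List.sorted combo (fun x => x) false
      let inp_prefix := PySem.Str.join "" inp_sorted ++ "1"
      vars_list.foldl (fun classes out =>
        classes.insert (inp_prefix ++ "_to_" ++ out ++ "2") ([] : List String)) classes)
      classes)
    classes).items

-- ===== PORT B =====
-- port of Source B's _combos: r-element combinations in position order, by structural recursion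
def combosB : List String → Nat → List (List String)
  | _, 0 => [[]]
  | [], _ + 1 => []
  | v :: rest, r + 1 => (combosB rest r).map (fun c => v :: c) ++ combosB rest (r + 1)

-- literal port of Source B: prefix list comprehension, then dict comprehension over the product
def generate_mapping_classes_alt (vars_list : List String) : List (String × List String) :=
  let prefixes := (PySem.List.pyRange 1 (PySem.List.len vars_list + 1) 1).flatMap (fun r =>
    (combosB vars_list r.toNat).map (fun c =>
      PySem.Str.join "" (PySem.List.sorted c (fun x => x) false) ++ "1"))
  ((prefixes.flatMap (fun p =>
      vars_list.map (fun out => (p ++ "_to_" ++ out ++ "2", ([] : List String))))).foldl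
    (fun (d : PySem.Dict String (List String)) kv => d.insert kv.1 kv.2)
    PySem.Dict.empty).items

-- ===== PRECONDITION & SPEC =====
def Spec_generate_mapping_classes (vars_list : List String) (out : List (String × List String)) : Prop := out = generate_mapping_classes_alt vars_list
instance (vars_list : List String) (out : List (String × List String)) : Decidable (Spec_generate_mapping_classes vars_list out) := by unfold Spec_generate_mapping_classes; infer_instance

-- ===== CLAIM =====
def Claim_equal_generate_mapping_classes : Prop := ∀ (vars_list : List String), Dom_generate_mapping_classes vars_list → Spec_generate_mapping_classes vars_list (generate_mapping_classes vars_list)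

-- ===== LEMMAS AND PROOFS =====

-- Source B's recursive generator computes itertools.combinations
lemma combosB_eq_combinations : ∀ (vs : List String) (r : Nat),
    combosB vs r = PySem.List.combinations vs r := by
  intro vs
  induction vs with
  | nil =>
    intro r
    cases r with
    | zero => simp [combosB, PySem.List.combinations_zero]
    | succ s => simp [combosB, PySem.List.combinations_nil_succ]
  | cons v rest ih =>
    intro r
    cases r with
    | zero => simp [combosB, PySem.List.combinations_zero]
    | succ s =>
      simp only [combosB, PySem.List.combinations_cons_succ, ih]

-- folding over a flattened list is the nested fold
lemma foldl_flatMap {α β γ : Type} (l : List α) (g : α → List β) (f : γ → β → γ) (init : γ) :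
    (l.flatMap g).foldl f init = l.foldl (fun acc x => (g x).foldl f acc) init := by
  induction l generalizing init with
  | nil => rfl
  | cons x t ih => simp [List.flatMap_cons, List.foldl_append, ih]

-- ===== VERDICT =====
theorem generate_mapping_classes_spec : Claim_equal_generate_mapping_classes := by
  intro vars_list _
  unfold Spec_generate_mapping_classes generate_mapping_classes generate_mapping_classes_alt
  dsimp only
  congr 1
  rw [foldl_flatMap, foldl_flatMap]
  refine (PySem.List.foldl_congr_mem _ _ _ _ (fun d r _ => ?_)).symm
  rw [combosB_eq_combinations, List.foldl_map]
  refine PySem.List.foldl_congr_mem _ _ _ _ (fun d c _ => ?_)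
  rw [List.foldl_map]
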